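-- pv_equiv track=rewrite | github.com/CrisUrrea/BingoGame | app/app.py | sort_bingo_table
-- ===== SOURCE A (Python) =====
-- def sort_bingo_table(numbers):
--     sorted_table = {'B': [], 'I': [], 'N': [], 'G': [], 'O': []}
--
--     for number in numbers:
--         if 1 <= number <= 15:
--             sorted_table['B'].append(number)
--         elif 16 <= number <= 30:
--             sorted_table['I'].append(number)
--         elif 31 <= number <= 45:
--             sorted_table['N'].append(number)
--         elif 46 <= number <= 60:
--             sorted_table['G'].append(number)
--         elif 61 <= number <= 75:
--             sorted_table['O'].append(number)
--
--     for key in sorted_table: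
--         sorted_table[key].sort()
--
--     sorted_numbers = []
--     for key in ['B', 'I', 'N', 'G', 'O']:
--         sorted_numbers.extend(sorted_table[key])
--
--     return sorted_numbers
-- ===== SOURCE B (Python) =====
-- def sort_bingo_table(numbers):
--     # Counting sort over the bounded bingo range 1..75 (out-of-range values are dropped, as in A).
--     counts = [0] * 76
--     for n in numbers:
--         if 1 <= n <= 75:
--             counts[n] += 1
--     out = []
--     for v in range(1, 76):
--         out.extend([v] * counts[v])
--     return out
-- ===== Notes on version B (the rewrite author's own statement) =====
-- stated objective: alternative
-- what changed: Replaces the five-bucket dict plus per-bucket comparison sorts and concatenation with a single-pass counting sort over the bounded range 1..75.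
import Mathlib
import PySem

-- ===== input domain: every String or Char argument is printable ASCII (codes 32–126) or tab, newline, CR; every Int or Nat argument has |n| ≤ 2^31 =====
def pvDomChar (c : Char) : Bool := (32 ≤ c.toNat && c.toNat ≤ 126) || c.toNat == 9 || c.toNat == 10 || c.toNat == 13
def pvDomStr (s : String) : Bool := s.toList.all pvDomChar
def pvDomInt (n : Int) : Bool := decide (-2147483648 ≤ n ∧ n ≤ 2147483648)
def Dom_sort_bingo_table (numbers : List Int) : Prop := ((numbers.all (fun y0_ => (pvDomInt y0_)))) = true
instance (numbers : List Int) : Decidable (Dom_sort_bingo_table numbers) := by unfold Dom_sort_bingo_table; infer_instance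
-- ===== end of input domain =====

-- B replaces the five-bucket dict + per-bucket sorts with a one-pass counting sort over 1..75 (objective: alternative algorithm).


-- ===== PORT A =====
-- The Python dict has the five fixed literal keys 'B','I','N','G','O' in insertion order;
-- it is ported exactly as a 5-tuple of lists in that order (append = list.append, exact).
def pvBuckets (numbers : List Int) :
    List Int × List Int × List Int × List Int × List Int :=
  numbers.foldl (fun t number =>
    if 1 ≤ number ∧ number ≤ 15 then (t.1 ++ [number], t.2.1, t.2.2.1, t.2.2.2.1, t.2.2.2.2)
    else if 16 ≤ number ∧ number ≤ 30 then (t.1, t.2.1 ++ [number], t.2.2.1, t.2.2.2.1, t.2.2.2.2)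
    else if 31 ≤ number ∧ number ≤ 45 then (t.1, t.2.1, t.2.2.1 ++ [number], t.2.2.2.1, t.2.2.2.2)
    else if 46 ≤ number ∧ number ≤ 60 then (t.1, t.2.1, t.2.2.1, t.2.2.2.1 ++ [number], t.2.2.2.2)
    else if 61 ≤ number ∧ number ≤ 75 then (t.1, t.2.1, t.2.2.1, t.2.2.2.1, t.2.2.2.2 ++ [number])
    else t) ([], [], [], [], [])

def sort_bingo_table (numbers : List Int) : List Int :=
  let t := pvBuckets numbers
  PySem.List.sorted t.1 (fun x => x) false ++
  PySem.List.sorted t.2.1 (fun x => x) false ++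
  PySem.List.sorted t.2.2.1 (fun x => x) false ++
  PySem.List.sorted t.2.2.2.1 (fun x => x) false ++
  PySem.List.sorted t.2.2.2.2 (fun x => x) false

-- ===== PORT B =====
def pvCounts (numbers : List Int) : List Int :=
  numbers.foldl (fun c n =>
    if 1 ≤ n ∧ n ≤ 75 then PySem.List.pySetD c n (PySem.List.pyGetD c n 0 + 1) else c)
    (List.replicate 76 0)

def sort_bingo_table_alt (numbers : List Int) : List Int :=
  let counts := pvCounts numbers
  (PySem.List.pyRange 1 76 1).foldl
    (fun out v => out ++ List.replicate (PySem.List.pyGetD counts v 0).toNat v) []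

-- ===== PRECONDITION & SPEC =====
def Spec_sort_bingo_table (numbers : List Int) (out : List Int) : Prop := out = sort_bingo_table_alt numbers
instance (numbers : List Int) (out : List Int) : Decidable (Spec_sort_bingo_table numbers out) := by unfold Spec_sort_bingo_table; infer_instance

-- ===== CLAIM (what is proved, stated in full; the proofs are below) =====
def Claim_equal_sort_bingo_table : Prop := ∀ (numbers : List Int), Dom_sort_bingo_table numbers → Spec_sort_bingo_table numbers (sort_bingo_table numbers)

-- ===== LEMMAS AND PROOFS =====

-- Canonical form both programs reduce to: each value of [lo,hi) repeated as often as it occurs in xs.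
def pvRep (xs : List Int) (lo hi : Int) : List Int :=
  (PySem.List.pyRange lo hi 1).flatMap (fun v => List.replicate (xs.count v) v)

lemma pvRep_count (xs : List Int) (a : Int) :
    ∀ (n : Nat) (lo hi : Int), (hi - lo).toNat = n →
      (pvRep xs lo hi).count a = if lo ≤ a ∧ a < hi then xs.count a else 0 := by
  intro n
  induction n with
  | zero =>
    intro lo hi h
    have hle : hi ≤ lo := by omega
    simp [pvRep, PySem.List.pyRange_one_eq_nil hle]
    omega
  | succ n ih =>
    intro lo hi h
    have hlt : lo < hi := by omega
    rw [pvRep, PySem.List.pyRange_one_cons hlt]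
    have := ih (lo + 1) hi (by omega)
    simp only [List.flatMap_cons, List.count_append, List.count_replicate]
    rw [show (PySem.List.pyRange (lo+1) hi).flatMap (fun v => List.replicate (xs.count v) v)
        = pvRep xs (lo+1) hi from rfl, this]
    by_cases hal : lo = a
    · subst hal; simp; omega
    · simp [hal]
      split_ifs with h1 h2 <;> first | rfl | omega

lemma pvRep_mem {xs : List Int} {lo hi y : Int} (hy : y ∈ pvRep xs lo hi) :
    lo ≤ y ∧ y < hi := by
  simp only [pvRep, List.mem_flatMap, List.mem_replicate] at hy
  obtain ⟨v, hv, _, rfl⟩ := hy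
  exact PySem.List.mem_pyRange_one.mp hv

lemma pvRep_pairwise (xs : List Int) :
    ∀ (n : Nat) (lo hi : Int), (hi - lo).toNat = n →
      (pvRep xs lo hi).Pairwise (fun a b => a ≤ b) := by
  intro n
  induction n with
  | zero =>
    intro lo hi h
    have hle : hi ≤ lo := by omega
    simp [pvRep, PySem.List.pyRange_one_eq_nil hle]
  | succ n ih =>
    intro lo hi h
    have hlt : lo < hi := by omega
    rw [pvRep, PySem.List.pyRange_one_cons hlt]
    simp only [List.flatMap_cons]
    rw [List.pairwise_append]
    refine ⟨List.pairwise_replicate.mpr (Or.inr le_rfl), ?_, ?_⟩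
    · exact ih (lo + 1) hi (by omega)
    · intro a ha b hb
      have ha' : a = lo := (List.mem_replicate.mp ha).2
      have hb' : lo + 1 ≤ b := (pvRep_mem hb).1
      omega

lemma pvRep_perm (xs : List Int) (lo hi : Int)
    (hmem : ∀ x ∈ xs, lo ≤ x ∧ x < hi) : (pvRep xs lo hi).Perm xs := by
  rw [List.perm_iff_count]
  intro a
  rw [pvRep_count xs a (hi - lo).toNat lo hi rfl]
  split_ifs with h
  · rfl
  · exact (List.count_eq_zero.mpr (fun hmem' => h (hmem a hmem'))).symm

-- sorted of a list of values all in [lo,hi) is the canonical counting form.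
lemma sorted_eq_pvRep (xs : List Int) (lo hi : Int)
    (hmem : ∀ x ∈ xs, lo ≤ x ∧ x < hi) :
    PySem.List.sorted xs (fun x => x) false = pvRep xs lo hi :=
  PySem.List.sorted_id_eq_of_perm_of_pairwise xs _ (pvRep_perm xs lo hi hmem)
    (pvRep_pairwise xs (hi - lo).toNat lo hi rfl)

-- A's buckets are the range filters of the input.
lemma pvBuckets_eq (numbers : List Int) :
    pvBuckets numbers =
      (numbers.filter (fun x => decide (1 ≤ x ∧ x ≤ 15)),
       numbers.filter (fun x => decide (16 ≤ x ∧ x ≤ 30)),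
       numbers.filter (fun x => decide (31 ≤ x ∧ x ≤ 45)),
       numbers.filter (fun x => decide (46 ≤ x ∧ x ≤ 60)),
       numbers.filter (fun x => decide (61 ≤ x ∧ x ≤ 75))) := by
  suffices h : ∀ (b i n g o : List Int),
      numbers.foldl (fun t number =>
        if 1 ≤ number ∧ number ≤ 15 then (t.1 ++ [number], t.2.1, t.2.2.1, t.2.2.2.1, t.2.2.2.2)
        else if 16 ≤ number ∧ number ≤ 30 then (t.1, t.2.1 ++ [number], t.2.2.1, t.2.2.2.1, t.2.2.2.2)
        else if 31 ≤ number ∧ number ≤ 45 then (t.1, t.2.1, t.2.2.1 ++ [number], t.2.2.2.1, t.2.2.2.2)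
        else if 46 ≤ number ∧ number ≤ 60 then (t.1, t.2.1, t.2.2.1, t.2.2.2.1 ++ [number], t.2.2.2.2)
        else if 61 ≤ number ∧ number ≤ 75 then (t.1, t.2.1, t.2.2.1, t.2.2.2.1, t.2.2.2.2 ++ [number])
        else t) (b, i, n, g, o) =
      (b ++ numbers.filter (fun x => decide (1 ≤ x ∧ x ≤ 15)),
       i ++ numbers.filter (fun x => decide (16 ≤ x ∧ x ≤ 30)),
       n ++ numbers.filter (fun x => decide (31 ≤ x ∧ x ≤ 45)),
       g ++ numbers.filter (fun x => decide (46 ≤ x ∧ x ≤ 60)),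
       o ++ numbers.filter (fun x => decide (61 ≤ x ∧ x ≤ 75))) by
    simpa using h [] [] [] [] []
  induction numbers with
  | nil => intro b i n g o; simp
  | cons x xs ih =>
    intro b i n g o
    simp only [List.foldl_cons]
    by_cases h1 : 1 ≤ x ∧ x ≤ 15
    · rw [if_pos h1, ih,
          List.filter_cons_of_pos (by simpa using h1),
          List.filter_cons_of_neg (p := fun x => decide (16 ≤ x ∧ x ≤ 30)) (by simp only [decide_eq_true_eq]; omega),
          List.filter_cons_of_neg (p := fun x => decide (31 ≤ x ∧ x ≤ 45)) (by simp only [decide_eq_true_eq]; omega),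
          List.filter_cons_of_neg (p := fun x => decide (46 ≤ x ∧ x ≤ 60)) (by simp only [decide_eq_true_eq]; omega),
          List.filter_cons_of_neg (p := fun x => decide (61 ≤ x ∧ x ≤ 75)) (by simp only [decide_eq_true_eq]; omega)]
      simp
    · by_cases h2 : 16 ≤ x ∧ x ≤ 30
      · rw [if_neg h1, if_pos h2, ih,
            List.filter_cons_of_neg (p := fun x => decide (1 ≤ x ∧ x ≤ 15)) (by simp only [decide_eq_true_eq]; omega),
            List.filter_cons_of_pos (by simpa using h2),
            List.filter_cons_of_neg (p := fun x => decide (31 ≤ x ∧ x ≤ 45)) (by simp only [decide_eq_true_eq]; omega),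
            List.filter_cons_of_neg (p := fun x => decide (46 ≤ x ∧ x ≤ 60)) (by simp only [decide_eq_true_eq]; omega),
            List.filter_cons_of_neg (p := fun x => decide (61 ≤ x ∧ x ≤ 75)) (by simp only [decide_eq_true_eq]; omega)]
        simp
      · by_cases h3 : 31 ≤ x ∧ x ≤ 45
        · rw [if_neg h1, if_neg h2, if_pos h3, ih,
              List.filter_cons_of_neg (p := fun x => decide (1 ≤ x ∧ x ≤ 15)) (by simp only [decide_eq_true_eq]; omega),
              List.filter_cons_of_neg (p := fun x => decide (16 ≤ x ∧ x ≤ 30)) (by simp only [decide_eq_true_eq]; omega),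
              List.filter_cons_of_pos (by simpa using h3),
              List.filter_cons_of_neg (p := fun x => decide (46 ≤ x ∧ x ≤ 60)) (by simp only [decide_eq_true_eq]; omega),
              List.filter_cons_of_neg (p := fun x => decide (61 ≤ x ∧ x ≤ 75)) (by simp only [decide_eq_true_eq]; omega)]
          simp
        · by_cases h4 : 46 ≤ x ∧ x ≤ 60
          · rw [if_neg h1, if_neg h2, if_neg h3, if_pos h4, ih,
                List.filter_cons_of_neg (p := fun x => decide (1 ≤ x ∧ x ≤ 15)) (by simp only [decide_eq_true_eq]; omega),
                List.filter_cons_of_neg (p := fun x => decide (16 ≤ x ∧ x ≤ 30)) (by simp only [decide_eq_true_eq]; omega),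
                List.filter_cons_of_neg (p := fun x => decide (31 ≤ x ∧ x ≤ 45)) (by simp only [decide_eq_true_eq]; omega),
                List.filter_cons_of_pos (by simpa using h4),
                List.filter_cons_of_neg (p := fun x => decide (61 ≤ x ∧ x ≤ 75)) (by simp only [decide_eq_true_eq]; omega)]
            simp
          · by_cases h5 : 61 ≤ x ∧ x ≤ 75
            · rw [if_neg h1, if_neg h2, if_neg h3, if_neg h4, if_pos h5, ih,
                  List.filter_cons_of_neg (p := fun x => decide (1 ≤ x ∧ x ≤ 15)) (by simp only [decide_eq_true_eq]; omega),
                  List.filter_cons_of_neg (p := fun x => decide (16 ≤ x ∧ x ≤ 30)) (by simp only [decide_eq_true_eq]; omega),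
                  List.filter_cons_of_neg (p := fun x => decide (31 ≤ x ∧ x ≤ 45)) (by simp only [decide_eq_true_eq]; omega),
                  List.filter_cons_of_neg (p := fun x => decide (46 ≤ x ∧ x ≤ 60)) (by simp only [decide_eq_true_eq]; omega),
                  List.filter_cons_of_pos (by simpa using h5)]
              simp
            · rw [if_neg h1, if_neg h2, if_neg h3, if_neg h4, if_neg h5, ih,
                  List.filter_cons_of_neg (p := fun x => decide (1 ≤ x ∧ x ≤ 15)) (by simp only [decide_eq_true_eq]; omega),
                  List.filter_cons_of_neg (p := fun x => decide (16 ≤ x ∧ x ≤ 30)) (by simp only [decide_eq_true_eq]; omega),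
                  List.filter_cons_of_neg (p := fun x => decide (31 ≤ x ∧ x ≤ 45)) (by simp only [decide_eq_true_eq]; omega),
                  List.filter_cons_of_neg (p := fun x => decide (46 ≤ x ∧ x ≤ 60)) (by simp only [decide_eq_true_eq]; omega),
                  List.filter_cons_of_neg (p := fun x => decide (61 ≤ x ∧ x ≤ 75)) (by simp only [decide_eq_true_eq]; omega)]

-- B's counts array holds the occurrence counts for every value in 1..75.
lemma pvCounts_spec (numbers : List Int) :
    (pvCounts numbers).length = 76 ∧
    ∀ v : Int, 1 ≤ v → v ≤ 75 →
      PySem.List.pyGetD (pvCounts numbers) v 0 = (numbers.count v : Int) := by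
  suffices h : ∀ (c : List Int), c.length = 76 →
      (numbers.foldl (fun c n =>
        if 1 ≤ n ∧ n ≤ 75 then PySem.List.pySetD c n (PySem.List.pyGetD c n 0 + 1) else c) c).length = 76 ∧
      ∀ v : Int, 1 ≤ v → v ≤ 75 →
        PySem.List.pyGetD (numbers.foldl (fun c n =>
          if 1 ≤ n ∧ n ≤ 75 then PySem.List.pySetD c n (PySem.List.pyGetD c n 0 + 1) else c) c) v 0
          = PySem.List.pyGetD c v 0 + (numbers.count v : Int) by
    obtain ⟨hlen, hget⟩ := h (List.replicate 76 0) (by simp)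
    refine ⟨hlen, fun v h1 h2 => ?_⟩
    rw [pvCounts, hget v h1 h2,
        PySem.List.pyGetD_eq_getElem _ 0 (by omega) (by simp; omega),
        List.getElem_replicate]
    simp
  induction numbers with
  | nil => intro c hc; simp [hc]
  | cons x xs ih =>
    intro c hc
    simp only [List.foldl_cons]
    by_cases hx : 1 ≤ x ∧ x ≤ 75
    · obtain ⟨hlen, hget⟩ := ih (PySem.List.pySetD c x (PySem.List.pyGetD c x 0 + 1))
        (by rw [PySem.List.length_pySetD]; exact hc)
      rw [if_pos hx]
      refine ⟨hlen, fun v h1 h2 => ?_⟩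
      rw [hget v h1 h2]
      rw [PySem.List.pySetD_of_nonneg c _ (by omega),
          PySem.List.pyGetD_eq_getElem _ 0 (by omega) (by rw [List.length_set, hc]; omega),
          PySem.List.pyGetD_eq_getElem c (i := v) 0 (by omega) (by rw [hc]; omega),
          List.getElem_set]
      by_cases hvx : v = x
      · subst hvx
        rw [if_pos rfl, List.count_cons,
            PySem.List.pyGetD_eq_getElem c (i := v) 0 (by omega) (by rw [hc]; omega)]
        simp
        ring
      · rw [if_neg (fun h => hvx (by omega)), List.count_cons,
            if_neg (by simp only [beq_iff_eq]; omega)]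
        simp
    · obtain ⟨hlen, hget⟩ := ih c hc
      rw [if_neg hx]
      refine ⟨hlen, fun v h1 h2 => ?_⟩
      rw [hget v h1 h2, List.count_cons, if_neg (by simp; omega)]
      simp

-- Filtering to the bucket's range does not change the counts the canonical form reads.
lemma pvRep_filter (xs : List Int) (lo hi : Int) :
    pvRep (xs.filter (fun x => decide (lo ≤ x ∧ x ≤ hi - 1))) lo hi = pvRep xs lo hi := by
  unfold pvRep
  rw [List.flatMap, List.flatMap]
  congr 1
  apply List.map_congr_left
  intro v hv
  have hb := PySem.List.mem_pyRange_one.mp hv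
  rw [List.count_filter (by simp only [decide_eq_true_eq]; omega)]

lemma pvRep_append (xs : List Int) (lo m hi : Int) (h1 : lo ≤ m) (h2 : m ≤ hi) :
    pvRep xs lo hi = pvRep xs lo m ++ pvRep xs m hi := by
  unfold pvRep
  rw [PySem.List.pyRange_one_append lo m hi h1 h2, List.flatMap_append]

-- Each sorted bucket of A is the canonical form of xs on its subrange.
lemma sorted_bucket (xs : List Int) (lo hi : Int) :
    PySem.List.sorted (xs.filter (fun x => decide (lo ≤ x ∧ x ≤ hi - 1))) (fun x => x) false
      = pvRep xs lo hi := by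
  rw [sorted_eq_pvRep _ lo hi, pvRep_filter]
  intro x hx
  have := (List.mem_filter.mp hx).2
  simp only [decide_eq_true_eq] at this
  omega

-- ===== VERDICT (by name: the statement is the Claim_ definition above) =====
theorem sort_bingo_table_spec : Claim_equal_sort_bingo_table := by
  intro numbers _
  unfold Spec_sort_bingo_table
  show sort_bingo_table numbers = sort_bingo_table_alt numbers
  have hA : sort_bingo_table numbers = pvRep numbers 1 76 := by
    rw [sort_bingo_table]
    show PySem.List.sorted (pvBuckets numbers).1 (fun x => x) false ++ _ ++ _ ++ _ ++ _ = _
    rw [pvBuckets_eq]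
    have b1 := sorted_bucket numbers 1 16
    have b2 := sorted_bucket numbers 16 31
    have b3 := sorted_bucket numbers 31 46
    have b4 := sorted_bucket numbers 46 61
    have b5 := sorted_bucket numbers 61 76
    norm_num at b1 b2 b3 b4 b5 ⊢
    rw [b1, b2, b3, b4, b5,
        pvRep_append numbers 1 16 76 (by omega) (by omega),
        pvRep_append numbers 16 31 76 (by omega) (by omega),
        pvRep_append numbers 31 46 76 (by omega) (by omega),
        pvRep_append numbers 46 61 76 (by omega) (by omega)]
  have hB : sort_bingo_table_alt numbers = pvRep numbers 1 76 := by
    rw [sort_bingo_table_alt]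
    show (PySem.List.pyRange 1 76 1).foldl
        (fun out v => out ++ List.replicate (PySem.List.pyGetD (pvCounts numbers) v 0).toNat v) []
      = pvRep numbers 1 76
    rw [PySem.List.foldl_congr_mem (PySem.List.pyRange 1 76 1) _
        (fun out v => out ++ List.replicate (numbers.count v) v) []
        (by
          intro acc v hv
          have hb := PySem.List.mem_pyRange_one.mp hv
          rw [(pvCounts_spec numbers).2 v (by omega) (by omega)]
          simp),
       PySem.List.foldl_append_eq_flatMap]
    rfl
  rw [hA, hB]
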